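-- pv_equiv track=rewrite | github.com/bob8dod/Preparing_CodingTest | BaekJoon/P1759.py | solution
-- ===== SOURCE A (Python) =====
-- from itertools import combinations
--
-- def solution(l, c, arr):
--     aeiou = {i for i in 'aeiou'}
--     mo, ja = set(), set()
--     for a in arr:
--         if a in aeiou: mo.add(a)
--         else: ja.add(a)
--
--     # ja_order = list(combinations(ja, 2))
--     results = set()
--     for m in mo:
--         for j1,j2 in combinations(ja, 2): # ja_order
--             rest = [mt for mt in mo if mt != m]
--             rest.extend([jt for jt in ja if jt != j1 and jt != j2])
--             rest_order = combinations(rest,l-3)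
--             for r_o in rest_order:
--                 result = m + j1 + j2
--                 for r in r_o:
--                     result += r
--                 results.add(''.join(sorted(result)))
--
--     return sorted(results)
-- ===== SOURCE B (Python) =====
-- def solution(l, c, arr):
--     vowels = {'a', 'e', 'i', 'o', 'u'}
--     items = sorted(set(arr))
--
--     def combos(xs, k):
--         if k == 0:
--             return [[]]
--         if k < 0 or k > len(xs):
--             return []
--         return [[xs[0]] + t for t in combos(xs[1:], k - 1)] + combos(xs[1:], k)
--
--     results = set()
--     for combo in combos(items, l):
--         nv = sum(1 for s in combo if s in vowels)
--         if nv >= 1 and len(combo) - nv >= 2: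
--             results.add(''.join(sorted(''.join(combo))))
--     return sorted(results)
-- ===== Notes on version B (the rewrite author's own statement) =====
-- stated objective: alternative
-- what changed: B deduplicates arr once, enumerates every l-element combination of the distinct items with a hand-written recursive combinations function, and keeps those with >=1 vowel and >=2 non-vowels, instead of A's triple nested construction (vowel x consonant-pair x leftover-combinations) that rebuilds each candidate subset many times and dedups through a set.
import Mathlib
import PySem

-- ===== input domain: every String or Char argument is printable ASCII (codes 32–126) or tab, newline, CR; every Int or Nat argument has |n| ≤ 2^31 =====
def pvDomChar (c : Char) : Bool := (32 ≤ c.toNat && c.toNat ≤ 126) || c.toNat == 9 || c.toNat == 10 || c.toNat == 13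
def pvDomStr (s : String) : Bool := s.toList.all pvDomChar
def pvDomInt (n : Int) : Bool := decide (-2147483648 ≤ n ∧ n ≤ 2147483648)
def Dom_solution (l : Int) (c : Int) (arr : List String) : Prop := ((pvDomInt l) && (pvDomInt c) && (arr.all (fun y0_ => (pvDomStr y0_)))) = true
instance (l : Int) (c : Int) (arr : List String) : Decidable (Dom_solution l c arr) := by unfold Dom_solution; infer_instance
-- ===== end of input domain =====

-- B enumerates each candidate subset once (dedup + recursive combinations + filter) instead of
-- A's vowel × consonant-pair × leftover nested construction that rebuilds every subset many times.


-- ===== PORT A =====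
-- itertools.combinations(rest, l-3) is PySem.List.combinations; its r is (l-3).toNat, which is
-- only reached inside Pre_ when l ≥ 3 (for l < 3 Python raises ValueError there — excluded by Pre_).
-- Python's comparison on str is code-point lexicographic = Lean's < on String.toList (PySem
-- 'str COMPARISON' note), so the keyless sorted(results) is ported with key String.toList.
def solution (l : Int) (c : Int) (arr : List String) : List String :=
  let aeiou : PySem.Set String := PySem.Set.ofList ["a", "e", "i", "o", "u"]
  let moja : PySem.Set String × PySem.Set String :=
    arr.foldl (fun p a =>
      if PySem.Set.contains aeiou a then (PySem.Set.add p.1 a, p.2)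
      else (p.1, PySem.Set.add p.2 a)) (PySem.Set.empty, PySem.Set.empty)
  let mo := moja.1
  let ja := moja.2
  let results : PySem.Set String :=
    mo.foldl (fun res m =>
      (PySem.List.combinations ja 2).foldl (fun res pr =>
        match pr with
        | [j1, j2] =>
          let rest := mo.filter (fun mt => mt != m) ++ ja.filter (fun jt => jt != j1 && jt != j2)
          (PySem.List.combinations rest (l - 3).toNat).foldl (fun res ro =>
            let result : List Char := ro.foldl (fun acc r => acc ++ r.toList) (m.toList ++ j1.toList ++ j2.toList)
            PySem.Set.add res (String.ofList (PySem.List.sorted result (fun x => x) false))) res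
        | _ => res) res) PySem.Set.empty
  PySem.List.sorted results (fun x => x) false

-- ===== PORT B =====
-- hand-written combos helper of Source B (all k-element sublists, heads first)
def pvCombos (xs : List String) (k : Int) : List (List String) :=
  if k = 0 then [[]]
  else if k < 0 ∨ (xs.length : Int) < k then []
  else match xs with
    | [] => []   -- unreachable: here 0 < k ≤ xs.length
    | x :: t => (pvCombos t (k - 1)).map (fun tl => x :: tl) ++ pvCombos t k

def solution_alt (l : Int) (c : Int) (arr : List String) : List String :=
  let vowels : PySem.Set String := PySem.Set.ofList ["a", "e", "i", "o", "u"]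
  let items := PySem.List.sorted (PySem.Set.ofList arr : List String) (fun x => x.toList) false   -- str < is code-point lex = < on .toList (PySem str COMPARISON note)
  let results : PySem.Set String :=
    (pvCombos items l).foldl (fun res combo =>
      let nv := combo.countP (fun s => PySem.Set.contains vowels s)
      if 1 ≤ nv ∧ 2 ≤ combo.length - nv then
        PySem.Set.add res (String.ofList (PySem.List.sorted (combo.map String.toList).flatten (fun x => x) false))
      else res) PySem.Set.empty
  PySem.List.sorted results (fun x => x) false

-- ===== PRECONDITION & SPEC =====
-- Pre_ excludes exactly the inputs on which Python A raises ValueError ('r must be non-negative'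
-- in combinations(rest, l-3)): l < 3 while arr holds at least one vowel and at least two distinct
-- non-vowel strings.  A returns on every other input.
def Pre_solution (l : Int) (c : Int) (arr : List String) : Prop :=
  3 ≤ l ∨ (∀ s ∈ arr, s ∉ (["a", "e", "i", "o", "u"] : List String)) ∨
    (PySem.List.dedup (arr.filter (fun s => decide (s ∉ (["a", "e", "i", "o", "u"] : List String))))).length < 2
instance (l : Int) (c : Int) (arr : List String) : Decidable (Pre_solution l c arr) := by unfold Pre_solution; infer_instance
def pvWitness_solution : Int × Int × List String := (4, 0, ["a", "b", "c", "d"])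

def Spec_solution (l : Int) (c : Int) (arr : List String) (out : List String) : Prop := out = solution_alt l c arr
instance (l : Int) (c : Int) (arr : List String) (out : List String) : Decidable (Spec_solution l c arr out) := by unfold Spec_solution; infer_instance

-- ===== CLAIM (what is proved, stated in full; the proofs are below) =====
def Claim_equal_solution : Prop := ∀ (l : Int) (c : Int) (arr : List String), Dom_solution l c arr → Pre_solution l c arr → Spec_solution l c arr (solution l c arr)
-- ===== LEMMAS AND PROOFS =====

def pvVlist : List String := ["a", "e", "i", "o", "u"]
def pvVow (s : String) : Bool := PySem.Set.contains (PySem.Set.ofList pvVlist) s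
def pvMo (arr : List String) : List String := PySem.Set.ofList (arr.filter pvVow)
def pvJa (arr : List String) : List String := PySem.Set.ofList (arr.filter (fun s => !pvVow s))
def pvItems (arr : List String) : List String := PySem.List.sorted (PySem.Set.ofList arr : List String) (fun x => x.toList) false
def pvRest (arr : List String) (m j1 j2 : String) : List String :=
  (pvMo arr).filter (fun mt => mt != m) ++ (pvJa arr).filter (fun jt => jt != j1 && jt != j2)
def pvKey (X : List String) : String := String.ofList (PySem.List.sorted (X.map String.toList).flatten (fun x => x) false)

def APred (l : Int) (arr : List String) (s : String) : Prop :=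
  ∃ m ∈ pvMo arr, ∃ j1 j2 : String, List.Sublist [j1, j2] (pvJa arr) ∧
    ∃ ro : List String, ro.Sublist (pvRest arr m j1 j2) ∧ ro.length = (l - 3).toNat ∧
      s = pvKey (m :: j1 :: j2 :: ro)

def BPred (l : Int) (arr : List String) (s : String) : Prop :=
  ∃ S : List String, S.Sublist (pvItems arr) ∧ (S.length : Int) = l ∧
    1 ≤ S.countP pvVow ∧ 2 ≤ S.countP (fun t => !pvVow t) ∧ s = pvKey S

def pvAset (l : Int) (arr : List String) : PySem.Set String :=
  (pvMo arr).foldl (fun res m =>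
    (PySem.List.combinations (pvJa arr) 2).foldl (fun res pr =>
      match pr with
      | [j1, j2] =>
        (PySem.List.combinations (pvRest arr m j1 j2) (l - 3).toNat).foldl (fun res ro =>
          PySem.Set.add res (String.ofList (PySem.List.sorted
            (ro.foldl (fun acc r => acc ++ r.toList) (m.toList ++ j1.toList ++ j2.toList)) (fun x => x) false))) res
      | _ => res) res) PySem.Set.empty

def pvBset (l : Int) (arr : List String) : PySem.Set String :=
  (pvCombos (pvItems arr) l).foldl (fun res combo =>
    let nv := combo.countP pvVow
    if 1 ≤ nv ∧ 2 ≤ combo.length - nv then PySem.Set.add res (pvKey combo) else res) PySem.Set.empty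

lemma pvCombos_eq (xs : List String) (k : Int) :
    pvCombos xs k = if k < 0 then [] else PySem.List.combinations xs k.toNat := by
  induction xs generalizing k with
  | nil =>
    rw [pvCombos]
    split
    · rename_i h; subst h; simp [PySem.List.combinations_zero]
    · rename_i h0
      split
      · rename_i h; simp only [List.length_nil, Nat.cast_zero] at h
        rcases h with h | h
        · simp [h]
        · have hk : ¬ k < 0 := by omega
          obtain ⟨r, hr⟩ : ∃ r : Nat, k.toNat = r + 1 := ⟨k.toNat - 1, by omega⟩
          simp [hk, hr, PySem.List.combinations_nil_succ]
      · rename_i h; simp only [List.length_nil, Nat.cast_zero] at h; omega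
  | cons x t ih =>
    rw [pvCombos]
    split
    · rename_i h; subst h; simp [PySem.List.combinations_zero]
    · rename_i h0
      split
      · rename_i h
        rcases h with h | h
        · simp [h]
        · have hl : (0:Int) ≤ ((x :: t).length : Int) := by positivity
          have hkn : ¬ k < 0 := by omega
          have hlen : (x :: t).length < k.toNat := by omega
          simp [hkn, PySem.List.combinations_eq_nil_of_length_lt _ hlen]
      · rename_i h
        simp only [not_or, not_lt] at h
        have hkn : ¬ k < 0 := by omega
        have hk1 : ¬ (k - 1) < 0 := by omega
        have hsucc : k.toNat = (k - 1).toNat + 1 := by omega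
        simp only [hkn, if_false, ih, hk1, hsucc, PySem.List.combinations_cons_succ]

lemma mem_foldl_set {α β : Type} [BEq α] (L : List β) (g : PySem.Set α → β → PySem.Set α)
    (Q : α → β → Prop) (h : ∀ res b x, x ∈ g res b ↔ x ∈ res ∨ Q x b)
    (init : PySem.Set α) (x : α) :
    x ∈ L.foldl g init ↔ x ∈ init ∨ ∃ b ∈ L, Q x b := by
  induction L generalizing init with
  | nil => simp
  | cons b L ih =>
    rw [List.foldl_cons, ih, h init b x, List.exists_mem_cons_iff]
    tauto

lemma nodup_foldl_set {α β : Type} [BEq α] (L : List β) (g : PySem.Set α → β → PySem.Set α)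
    (h : ∀ res b, res.Nodup → (g res b).Nodup) (init : PySem.Set α) (hi : init.Nodup) :
    (L.foldl g init).Nodup := by
  induction L generalizing init with
  | nil => exact hi
  | cons b L ih => exact ih (g init b) (h init b hi)

lemma moja_eq (arr : List String) :
    arr.foldl (fun (p : PySem.Set String × PySem.Set String) a =>
      if PySem.Set.contains (PySem.Set.ofList ["a", "e", "i", "o", "u"]) a then (PySem.Set.add p.1 a, p.2)
      else (p.1, PySem.Set.add p.2 a)) (PySem.Set.empty, PySem.Set.empty) = (pvMo arr, pvJa arr) := by
  have hstep : ∀ (p : PySem.Set String × PySem.Set String) (a : String), a ∈ arr →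
      (if PySem.Set.contains (PySem.Set.ofList ["a", "e", "i", "o", "u"]) a then (PySem.Set.add p.1 a, p.2)
       else (p.1, PySem.Set.add p.2 a))
      = (if pvVow a then PySem.Set.add p.1 a else p.1, if !pvVow a then PySem.Set.add p.2 a else p.2) := by
    intro p a _
    simp only [pvVow, pvVlist]
    rcases Bool.eq_false_or_eq_true (PySem.Set.contains (PySem.Set.ofList ["a", "e", "i", "o", "u"]) a) with h | h <;>
      simp only [h] <;> simp
  rw [PySem.List.foldl_congr_mem arr _ _ _ hstep]
  rw [PySem.List.foldl_prod_mk (f := fun s a => if pvVow a then PySem.Set.add s a else s)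
      (g := fun s a => if !pvVow a then PySem.Set.add s a else s)]
  rw [PySem.List.foldl_if_eq_foldl_filter, PySem.List.foldl_if_eq_foldl_filter]
  rfl

lemma solution_eq (l c : Int) (arr : List String) :
    solution l c arr = PySem.List.sorted (pvAset l arr) (fun x => x) false := by
  simp only [solution]
  rw [moja_eq]
  rfl

lemma solution_alt_eq (l c : Int) (arr : List String) :
    solution_alt l c arr = PySem.List.sorted (pvBset l arr) (fun x => x) false := by
  rfl

lemma pvKey_foldl (m j1 j2 : String) (ro : List String) :
    String.ofList (PySem.List.sorted
      (ro.foldl (fun acc r => acc ++ r.toList) (m.toList ++ j1.toList ++ j2.toList)) (fun x => x) false)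
      = pvKey (m :: j1 :: j2 :: ro) := by
  rw [PySem.List.foldl_append_eq_flatMap]
  unfold pvKey
  congr 2
  simp [List.append_assoc, List.flatMap_def]

lemma mem_pvAset (l : Int) (arr : List String) (x : String) :
    x ∈ pvAset l arr ↔ APred l arr x := by
  unfold pvAset
  refine (mem_foldl_set _ _ (fun x m => ∃ j1 j2 : String, List.Sublist [j1, j2] (pvJa arr) ∧
      ∃ ro : List String, ro.Sublist (pvRest arr m j1 j2) ∧ ro.length = (l - 3).toNat ∧
        x = pvKey (m :: j1 :: j2 :: ro)) ?_ _ _).trans ?_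
  · intro res m x
    refine (mem_foldl_set _ _ (fun x pr => ∃ j1 j2 : String, pr = [j1, j2] ∧
        ∃ ro : List String, ro.Sublist (pvRest arr m j1 j2) ∧ ro.length = (l - 3).toNat ∧
          x = pvKey (m :: j1 :: j2 :: ro)) ?_ _ _).trans ?_
    · intro res pr x
      rcases pr with _ | ⟨j1, _ | ⟨j2, _ | ⟨j3, t⟩⟩⟩
      · simp
      · simp
      · refine (mem_foldl_set _ (fun res ro => PySem.Set.add res (String.ofList (PySem.List.sorted
            (ro.foldl (fun acc r => acc ++ r.toList) (m.toList ++ j1.toList ++ j2.toList)) (fun x => x) false)))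
            (fun x ro => x = pvKey (m :: j1 :: j2 :: ro)) ?_ _ _).trans ?_
        · intro res ro x
          beta_reduce
          rw [pvKey_foldl]
          exact PySem.Set.mem_add res (pvKey (m :: j1 :: j2 :: ro)) x
        · exact or_congr Iff.rfl (by
            constructor
            · rintro ⟨ro, hro, hx⟩
              rw [PySem.List.mem_combinations_iff] at hro
              exact ⟨j1, j2, rfl, ro, hro.1, hro.2, hx⟩
            · rintro ⟨j1', j2', heq, ro, h1, h2, hx⟩
              obtain ⟨rfl, rfl⟩ : j1 = j1' ∧ j2 = j2' := by simpa using heq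
              exact ⟨ro, (PySem.List.mem_combinations_iff _ _ _).mpr ⟨h1, h2⟩, hx⟩)
      · simp
    · exact or_congr Iff.rfl (by
        constructor
        · rintro ⟨pr, hpr, j1, j2, rfl, hrest⟩
          rw [PySem.List.mem_combinations_iff] at hpr
          exact ⟨j1, j2, hpr.1, hrest⟩
        · rintro ⟨j1, j2, hsub, hrest⟩
          exact ⟨[j1, j2], (PySem.List.mem_combinations_iff _ _ _).mpr ⟨hsub, rfl⟩, j1, j2, rfl, hrest⟩)
  · unfold APred
    simp [PySem.Set.empty]

lemma mem_pvBset (l : Int) (arr : List String) (x : String) :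
    x ∈ pvBset l arr ↔ BPred l arr x := by
  unfold pvBset
  refine (mem_foldl_set _ _ (fun x combo => (1 ≤ combo.countP pvVow ∧
      2 ≤ combo.length - combo.countP pvVow) ∧ x = pvKey combo) ?_ _ _).trans ?_
  · intro res combo x
    show x ∈ (if 1 ≤ combo.countP pvVow ∧ 2 ≤ combo.length - combo.countP pvVow
        then PySem.Set.add res (pvKey combo) else res) ↔ _
    split_ifs with hc
    · rw [PySem.Set.mem_add res (pvKey combo) x]
      tauto
    · tauto
  · have he : x ∉ (PySem.Set.empty : PySem.Set String) := List.not_mem_nil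
    unfold BPred
    constructor
    · rintro (h | ⟨combo, hmem, ⟨h1, h2⟩, rfl⟩)
      · exact absurd h he
      · rw [pvCombos_eq] at hmem
        by_cases hl : l < 0
        · simp [hl] at hmem
        · simp only [hl, if_false] at hmem
          rw [PySem.List.mem_combinations_iff] at hmem
          have hsplit : combo.length = combo.countP pvVow + combo.countP (fun t => !pvVow t) := by
            rw [combo.length_eq_countP_add_countP pvVow]
            congr 1
            apply List.countP_congr
            intro a _
            by_cases h : pvVow a = true <;> simp [h]
          refine ⟨combo, hmem.1, ?_, h1, ?_, rfl⟩
          · have := hmem.2; omega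
          · omega
    · rintro ⟨S, hsub, hlen, h1, h2, rfl⟩
      have hl : ¬ l < 0 := by omega
      have hsplit : S.length = S.countP pvVow + S.countP (fun t => !pvVow t) := by
        rw [S.length_eq_countP_add_countP pvVow]
        congr 1
        apply List.countP_congr
        intro a _
        by_cases h : pvVow a = true <;> simp [h]
      refine Or.inr ⟨S, ?_, ⟨h1, by omega⟩, rfl⟩
      rw [pvCombos_eq]
      simp only [hl, if_false]
      exact (PySem.List.mem_combinations_iff _ _ _).mpr ⟨hsub, by omega⟩

lemma nodup_pvAset (l : Int) (arr : List String) : (pvAset l arr).Nodup := by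
  unfold pvAset
  refine nodup_foldl_set _ _ ?_ _ List.nodup_nil
  intro res m hres
  refine nodup_foldl_set _ _ ?_ _ hres
  intro res pr hres2
  rcases pr with _ | ⟨j1, _ | ⟨j2, _ | ⟨j3, t⟩⟩⟩
  · exact hres2
  · exact hres2
  · refine nodup_foldl_set _ _ ?_ _ hres2
    intro res ro h
    exact PySem.Set.nodup_add _ _ h
  · exact hres2

lemma nodup_pvBset (l : Int) (arr : List String) : (pvBset l arr).Nodup := by
  unfold pvBset
  refine nodup_foldl_set _ _ ?_ _ List.nodup_nil
  intro res combo hres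
  show (if 1 ≤ combo.countP pvVow ∧ 2 ≤ combo.length - combo.countP pvVow
      then PySem.Set.add res (pvKey combo) else res).Nodup
  split_ifs with hc
  · exact PySem.Set.nodup_add _ _ hres
  · exact hres

lemma pvVow_iff (a : String) : pvVow a = true ↔ a ∈ (["a", "e", "i", "o", "u"] : List String) := by
  rw [pvVow, pvVlist, PySem.Set.contains_iff, PySem.Set.mem_ofList]

lemma pvVow_false_iff (a : String) : pvVow a = false ↔ a ∉ (["a", "e", "i", "o", "u"] : List String) := by
  rw [← pvVow_iff]
  cases pvVow a <;> simp

lemma mem_pvMo (arr : List String) (y : String) : y ∈ pvMo arr ↔ y ∈ arr ∧ pvVow y = true := by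
  rw [pvMo, PySem.Set.mem_ofList, List.mem_filter]

lemma mem_pvJa (arr : List String) (y : String) : y ∈ pvJa arr ↔ y ∈ arr ∧ pvVow y = false := by
  rw [pvJa, PySem.Set.mem_ofList, List.mem_filter]
  simp

lemma nodup_pvMo (arr : List String) : (pvMo arr).Nodup := PySem.Set.nodup_ofList _
lemma nodup_pvJa (arr : List String) : (pvJa arr).Nodup := PySem.Set.nodup_ofList _

lemma mem_pvItems (arr : List String) (y : String) : y ∈ pvItems arr ↔ y ∈ arr := by
  rw [pvItems, PySem.List.mem_sorted, PySem.Set.mem_ofList]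

lemma nodup_pvItems (arr : List String) : (pvItems arr).Nodup :=
  ((PySem.List.sorted_perm _ _ _).nodup_iff).mpr (PySem.Set.nodup_ofList _)

lemma mem_pvRest (arr : List String) (m j1 j2 t : String) :
    t ∈ pvRest arr m j1 j2 ↔ (t ∈ pvMo arr ∧ t ≠ m) ∨ (t ∈ pvJa arr ∧ t ≠ j1 ∧ t ≠ j2) := by
  rw [pvRest, List.mem_append, List.mem_filter, List.mem_filter]
  simp

lemma nodup_pvRest (arr : List String) (m j1 j2 : String) : (pvRest arr m j1 j2).Nodup := by
  rw [pvRest]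
  refine List.Nodup.append (List.Nodup.filter _ (nodup_pvMo arr)) (List.Nodup.filter _ (nodup_pvJa arr)) ?_
  intro a ha hb
  have h1 := ((mem_pvMo arr a).mp (List.mem_of_mem_filter ha)).2
  have h2 := ((mem_pvJa arr a).mp (List.mem_of_mem_filter hb)).2
  simp [h1] at h2

lemma pvKey_perm {X Y : List String} (h : X.Perm Y) : pvKey X = pvKey Y := by
  rw [pvKey, pvKey]
  congr 1
  exact PySem.List.sorted_eq_sorted_of_perm _ _ _ (fun a b hh => hh) ((h.map String.toList).flatten)

lemma two_le_len {L : List String} (hnd : L.Nodup) {a b : String} (ha : a ∈ L) (hb : b ∈ L)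
    (hne : a ≠ b) : 2 ≤ L.length := by
  have hcard : L.toFinset.card = L.length := List.toFinset_card_of_nodup hnd
  have hsub : ({a, b} : Finset String) ⊆ L.toFinset := by
    intro x hx
    rcases Finset.mem_insert.mp hx with rfl | hx
    · exact List.mem_toFinset.mpr ha
    · have := Finset.mem_singleton.mp hx
      subst this
      exact List.mem_toFinset.mpr hb
  have hle := Finset.card_le_card hsub
  rwa [Finset.card_pair hne, hcard] at hle

lemma pvJa_eq_dedup (arr : List String) : pvJa arr =
    PySem.List.dedup (arr.filter (fun s => decide (s ∉ (["a", "e", "i", "o", "u"] : List String)))) := by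
  rw [PySem.List.dedup_eq_ofList, pvJa]
  congr 1
  apply List.filter_congr
  intro a _
  by_cases h : a ∈ (["a", "e", "i", "o", "u"] : List String)
  · simp [h, (pvVow_iff a).mpr h]
  · have hf : pvVow a = false := (pvVow_false_iff a).mpr h
    simp [h, hf]

lemma AtoB (l : Int) (arr : List String) (hpre : Pre_solution l 0 arr) (s : String)
    (h : APred l arr s) : BPred l arr s := by
  obtain ⟨m, hm, j1, j2, hpair, ro, hro_sub, hro_len, rfl⟩ := h
  have hmv : pvVow m = true := ((mem_pvMo arr m).mp hm).2
  have hmarr : m ∈ arr := ((mem_pvMo arr m).mp hm).1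
  have hj1 : j1 ∈ pvJa arr := hpair.subset (by simp)
  have hj2 : j2 ∈ pvJa arr := hpair.subset (by simp)
  have hj1v : pvVow j1 = false := ((mem_pvJa arr j1).mp hj1).2
  have hj2v : pvVow j2 = false := ((mem_pvJa arr j2).mp hj2).2
  have hj12 : j1 ≠ j2 := by
    have := hpair.nodup (nodup_pvJa arr)
    simp at this
    exact this
  -- Pre_ forces 3 ≤ l here
  have hl3 : 3 ≤ l := by
    rcases hpre with h3 | hnov | hlen
    · exact h3
    · exact absurd ((pvVow_iff m).mp hmv) (hnov m hmarr)
    · exfalso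
      have hlle := hpair.length_le
      rw [pvJa_eq_dedup arr] at hlle
      simp only [List.length_cons, List.length_nil] at hlle
      omega
  set X : List String := m :: j1 :: j2 :: ro with hX
  have hro_rest := hro_sub.subset
  have hXnd : X.Nodup := by
    rw [hX]
    refine List.nodup_cons.mpr ⟨?_, List.nodup_cons.mpr ⟨?_, List.nodup_cons.mpr
      ⟨?_, hro_sub.nodup (nodup_pvRest arr m j1 j2)⟩⟩⟩
    · intro hmem
      rcases List.mem_cons.mp hmem with rfl | hmem
      · simp [hmv] at hj1v
      rcases List.mem_cons.mp hmem with rfl | hmem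
      · simp [hmv] at hj2v
      · rcases (mem_pvRest arr m j1 j2 m).mp (hro_rest hmem) with ⟨_, hne⟩ | ⟨hja, _⟩
        · exact hne rfl
        · have := ((mem_pvJa arr m).mp hja).2
          simp [hmv] at this
    · intro hmem
      rcases List.mem_cons.mp hmem with rfl | hmem
      · exact hj12 rfl
      · rcases (mem_pvRest arr m j1 j2 j1).mp (hro_rest hmem) with ⟨hmo, _⟩ | ⟨_, hne, _⟩
        · have := ((mem_pvMo arr j1).mp hmo).2
          simp [hj1v] at this
        · exact hne rfl
    · intro hmem
      rcases (mem_pvRest arr m j1 j2 j2).mp (hro_rest hmem) with ⟨hmo, _⟩ | ⟨_, _, hne⟩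
      · have := ((mem_pvMo arr j2).mp hmo).2
        simp [hj2v] at this
      · exact hne rfl
  have hXarr : ∀ t ∈ X, t ∈ arr := by
    intro t ht
    rw [hX] at ht
    rcases List.mem_cons.mp ht with rfl | ht
    · exact hmarr
    rcases List.mem_cons.mp ht with rfl | ht
    · exact ((mem_pvJa arr t).mp hj1).1
    rcases List.mem_cons.mp ht with rfl | ht
    · exact ((mem_pvJa arr t).mp hj2).1
    · rcases (mem_pvRest arr m j1 j2 t).mp (hro_rest ht) with ⟨hmo, _⟩ | ⟨hja, _⟩
      · exact ((mem_pvMo arr t).mp hmo).1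
      · exact ((mem_pvJa arr t).mp hja).1
  set S : List String := (pvItems arr).filter (fun t => decide (t ∈ X)) with hS
  have hSsub : S.Sublist (pvItems arr) := List.filter_sublist
  have hSnd : S.Nodup := hSsub.nodup (nodup_pvItems arr)
  have hSX : S.Perm X := by
    rw [List.perm_ext_iff_of_nodup hSnd hXnd]
    intro t
    rw [hS]
    simp only [List.mem_filter, decide_eq_true_eq]
    constructor
    · exact fun ht => ht.2
    · intro ht
      exact ⟨(mem_pvItems arr t).mpr (hXarr t ht), ht⟩
  have hlenX : X.length = 3 + ro.length := by
    rw [hX]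
    simp only [List.length_cons]
    omega
  have hSlen : (S.length : Int) = l := by
    rw [hSX.length_eq, hlenX, hro_len]
    omega
  refine ⟨S, hSsub, hSlen, ?_, ?_, pvKey_perm hSX.symm⟩
  · rw [hSX.countP_eq]
    have : 0 < X.countP pvVow := List.countP_pos_iff.mpr ⟨m, by simp [hX], hmv⟩
    omega
  · rw [hSX.countP_eq, List.countP_eq_length_filter]
    refine two_le_len (List.Nodup.filter _ hXnd) (a := j1) (b := j2) ?_ ?_ hj12
    · rw [List.mem_filter]
      exact ⟨by simp [hX], by simp [hj1v]⟩
    · rw [List.mem_filter]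
      exact ⟨by simp [hX], by simp [hj2v]⟩

lemma BtoA (l : Int) (arr : List String) (s : String)
    (h : BPred l arr s) : APred l arr s := by
  obtain ⟨S, hsub, hlen, h1, h2, rfl⟩ := h
  have hSnd : S.Nodup := hsub.nodup (nodup_pvItems arr)
  have hSarr : ∀ t ∈ S, t ∈ arr := fun t ht => (mem_pvItems arr t).mp (hsub.subset ht)
  obtain ⟨m, hmS, hmv⟩ := List.countP_pos_iff.mp (by omega : 0 < S.countP pvVow)
  have hm : m ∈ pvMo arr := (mem_pvMo arr m).mpr ⟨hSarr m hmS, hmv⟩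
  -- two distinct non-vowels of S
  have hcs : 2 ≤ (S.filter (fun t => !pvVow t)).length := by
    rw [← List.countP_eq_length_filter]
    omega
  obtain ⟨c1, c2, cs', hcs_eq⟩ : ∃ c1 c2 cs', S.filter (fun t => !pvVow t) = c1 :: c2 :: cs' := by
    rcases hf : S.filter (fun t => !pvVow t) with _ | ⟨c1, _ | ⟨c2, cs'⟩⟩
    · rw [hf] at hcs; simp at hcs
    · rw [hf] at hcs; simp at hcs
    · exact ⟨c1, c2, _, rfl⟩
  have hc1f : c1 ∈ S.filter (fun t => !pvVow t) := by rw [hcs_eq]; simp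
  have hc2f : c2 ∈ S.filter (fun t => !pvVow t) := by rw [hcs_eq]; simp
  have hc12 : c1 ≠ c2 := by
    have hnd := List.Nodup.filter (fun t => !pvVow t) hSnd
    rw [hcs_eq] at hnd
    simp at hnd
    exact hnd.1.1
  have hc1S : c1 ∈ S := List.mem_of_mem_filter hc1f
  have hc2S : c2 ∈ S := List.mem_of_mem_filter hc2f
  have hc1v : pvVow c1 = false := by
    have := (List.mem_filter.mp hc1f).2; simpa using this
  have hc2v : pvVow c2 = false := by
    have := (List.mem_filter.mp hc2f).2; simpa using this
  have hc1ja : c1 ∈ pvJa arr := (mem_pvJa arr c1).mpr ⟨hSarr c1 hc1S, hc1v⟩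
  have hc2ja : c2 ∈ pvJa arr := (mem_pvJa arr c2).mpr ⟨hSarr c2 hc2S, hc2v⟩
  -- the pair in ja's order
  set p : List String := (pvJa arr).filter (fun t => decide (t ∈ ([c1, c2] : List String))) with hpdef
  have hp_sub : p.Sublist (pvJa arr) := List.filter_sublist
  have hp_nd : p.Nodup := hp_sub.nodup (nodup_pvJa arr)
  have hp_perm : p.Perm [c1, c2] := by
    rw [List.perm_ext_iff_of_nodup hp_nd (by simp [hc12])]
    intro t
    rw [hpdef]
    simp only [List.mem_filter, decide_eq_true_eq]
    constructor
    · exact fun ht => ht.2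
    · intro ht
      refine ⟨?_, ht⟩
      rcases List.mem_cons.mp ht with rfl | ht2
      · exact hc1ja
      · have : t = c2 := by simpa using ht2
        subst this
        exact hc2ja
  obtain ⟨j1, j2, hp_eq⟩ : ∃ j1 j2, p = [j1, j2] := by
    have hlp : p.length = 2 := by rw [hp_perm.length_eq]; rfl
    rcases hpv : p with _ | ⟨j1, _ | ⟨j2, _ | _⟩⟩ <;> rw [hpv] at hlp <;> simp at hlp
    exact ⟨j1, j2, rfl⟩
  have hpair : List.Sublist [j1, j2] (pvJa arr) := hp_eq ▸ hp_sub
  have hjmem : ∀ t, t ∈ ([j1, j2] : List String) ↔ t ∈ ([c1, c2] : List String) := by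
    intro t
    rw [← hp_eq]
    exact ⟨fun ht => (hp_perm.mem_iff).mp ht, fun ht => (hp_perm.mem_iff).mpr ht⟩
  have hj1c : j1 = c1 ∨ j1 = c2 := by
    have := (hjmem j1).mp (by simp)
    simpa using this
  have hj2c : j2 = c1 ∨ j2 = c2 := by
    have := (hjmem j2).mp (by simp)
    simpa using this
  have hj1S : j1 ∈ S := by
    rcases hj1c with h | h <;> (subst h)
    · exact hc1S
    · exact hc2S
  have hj2S : j2 ∈ S := by
    rcases hj2c with h | h <;> (subst h)
    · exact hc1S
    · exact hc2S
  have hj1v : pvVow j1 = false := by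
    rcases hj1c with h | h <;> (subst h)
    · exact hc1v
    · exact hc2v
  have hj2v : pvVow j2 = false := by
    rcases hj2c with h | h <;> (subst h)
    · exact hc1v
    · exact hc2v
  have hj12 : j1 ≠ j2 := by
    have := hp_eq ▸ hp_nd
    simp at this
    exact this
  -- the leftovers in rest's order
  set ro : List String := (pvRest arr m j1 j2).filter (fun t => decide (t ∈ S)) with hrodef
  have hro_sub : ro.Sublist (pvRest arr m j1 j2) := List.filter_sublist
  have hro_nd : ro.Nodup := hro_sub.nodup (nodup_pvRest arr m j1 j2)
  have hro_mem : ∀ t, t ∈ ro ↔ t ∈ pvRest arr m j1 j2 ∧ t ∈ S := by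
    intro t
    rw [hrodef]
    simp [List.mem_filter]
  set X : List String := m :: j1 :: j2 :: ro with hX
  have hXnd : X.Nodup := by
    rw [hX]
    refine List.nodup_cons.mpr ⟨?_, List.nodup_cons.mpr ⟨?_, List.nodup_cons.mpr ⟨?_, hro_nd⟩⟩⟩
    · intro hmem
      rcases List.mem_cons.mp hmem with rfl | hmem
      · simp [hmv] at hj1v
      rcases List.mem_cons.mp hmem with rfl | hmem
      · simp [hmv] at hj2v
      · rcases (mem_pvRest arr m j1 j2 m).mp ((hro_mem m).mp hmem).1 with ⟨_, hne⟩ | ⟨hja, _⟩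
        · exact hne rfl
        · have := ((mem_pvJa arr m).mp hja).2
          simp [hmv] at this
    · intro hmem
      rcases List.mem_cons.mp hmem with rfl | hmem
      · exact hj12 rfl
      · rcases (mem_pvRest arr m j1 j2 j1).mp ((hro_mem j1).mp hmem).1 with ⟨hmo, _⟩ | ⟨_, hne, _⟩
        · have := ((mem_pvMo arr j1).mp hmo).2
          simp [hj1v] at this
        · exact hne rfl
    · intro hmem
      rcases (mem_pvRest arr m j1 j2 j2).mp ((hro_mem j2).mp hmem).1 with ⟨hmo, _⟩ | ⟨_, _, hne⟩
      · have := ((mem_pvMo arr j2).mp hmo).2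
        simp [hj2v] at this
      · exact hne rfl
  have hXS : X.Perm S := by
    rw [List.perm_ext_iff_of_nodup hXnd hSnd]
    intro t
    rw [hX]
    constructor
    · intro ht
      rcases List.mem_cons.mp ht with rfl | ht
      · exact hmS
      rcases List.mem_cons.mp ht with rfl | ht
      · exact hj1S
      rcases List.mem_cons.mp ht with rfl | ht
      · exact hj2S
      · exact ((hro_mem t).mp ht).2
    · intro htS
      by_cases hm' : t = m
      · subst hm'; simp
      by_cases hj1' : t = j1
      · subst hj1'; simp
      by_cases hj2' : t = j2
      · subst hj2'; simp
      refine List.mem_cons.mpr (Or.inr (List.mem_cons.mpr (Or.inr (List.mem_cons.mpr (Or.inr ?_)))))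
      rw [hro_mem t]
      refine ⟨(mem_pvRest arr m j1 j2 t).mpr ?_, htS⟩
      cases hv : pvVow t with
      | false => exact Or.inr ⟨(mem_pvJa arr t).mpr ⟨hSarr t htS, hv⟩, hj1', hj2'⟩
      | true => exact Or.inl ⟨(mem_pvMo arr t).mpr ⟨hSarr t htS, hv⟩, hm'⟩
  have hS3 : 3 ≤ S.length := by
    have hsplit : S.length = S.countP pvVow + S.countP (fun t => !pvVow t) := by
      rw [S.length_eq_countP_add_countP pvVow]
      congr 1
      apply List.countP_congr
      intro a _
      by_cases h : pvVow a = true <;> simp [h]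
    omega
  have hro_len : ro.length = (l - 3).toNat := by
    have := hXS.length_eq
    rw [hX] at this
    simp only [List.length_cons] at this
    omega
  exact ⟨m, hm, j1, j2, hpair, ro, hro_sub, hro_len, pvKey_perm hXS.symm⟩

lemma APred_iff_BPred (l : Int) (arr : List String) (hpre : Pre_solution l 0 arr) (s : String) :
    APred l arr s ↔ BPred l arr s :=
  ⟨AtoB l arr hpre s, BtoA l arr s⟩

-- ===== VERDICT (by name: the statement is the Claim_ definition above) =====
theorem solution_spec : Claim_equal_solution := by
  intro l c arr _hdom hpre
  unfold Spec_solution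
  rw [solution_eq, solution_alt_eq]
  apply PySem.List.sorted_eq_sorted_of_perm _ _ _ (fun a b h => h)
  rw [List.perm_ext_iff_of_nodup (nodup_pvAset l arr) (nodup_pvBset l arr)]
  intro x
  rw [mem_pvAset, mem_pvBset]
  exact APred_iff_BPred l arr (by
    cases hpre with
    | inl h => exact Or.inl h
    | inr h => exact Or.inr h) x
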